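-- pv_equiv track=rewrite | github.com/JHauser48/University-of-Pittsburgh | cs1656/a3/arma.py | get_vfi_subsets
-- ===== SOURCE A (Python) =====
-- from itertools import combinations_with_replacement
--
-- def get_vfi_subsets(vfi_col):
--   subsets = []
--   # get all subsets of given size (set_size)
--   for set_tup in combinations_with_replacement(vfi_col, set_size):
--     subsets.append(set_tup)
--
--   # remove tuples with duplicate values
--   for value in sorted(subsets):
--     if(len(set(value)) != len(value)):
--       subsets.remove(value)
--
--   return subsets
--
-- set_size = 1    # initial set size to fill VFI with
-- ===== SOURCE B (Python) =====
-- set_size = 1    # initial set size to fill VFI with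
--
-- def get_vfi_subsets(vfi_col):
--     # With set_size == 1 every combination is a singleton tuple, which never has
--     # duplicate values, so the result is just one singleton tuple per element.
--     return [(v,) for v in vfi_col]
-- ===== Notes on version B (the rewrite author's own statement) =====
-- stated objective: simpler
-- what changed: Replaces the combinations_with_replacement enumeration plus the sort-and-remove duplicate-filter pass by a single comprehension emitting one singleton tuple per element, which is what set_size == 1 makes A compute.
import Mathlib
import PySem

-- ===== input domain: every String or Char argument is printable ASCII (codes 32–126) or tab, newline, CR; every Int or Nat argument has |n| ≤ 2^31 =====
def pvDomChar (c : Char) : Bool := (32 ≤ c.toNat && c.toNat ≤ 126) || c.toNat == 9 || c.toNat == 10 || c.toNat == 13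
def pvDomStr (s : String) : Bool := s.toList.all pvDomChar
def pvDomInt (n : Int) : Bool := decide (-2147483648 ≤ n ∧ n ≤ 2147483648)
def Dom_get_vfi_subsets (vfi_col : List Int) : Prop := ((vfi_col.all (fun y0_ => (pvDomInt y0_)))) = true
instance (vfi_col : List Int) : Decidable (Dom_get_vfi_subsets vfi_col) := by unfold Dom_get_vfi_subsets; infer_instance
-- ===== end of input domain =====

-- B replaces A's combinations_with_replacement enumeration and its sort-and-remove
-- duplicate-filter pass by one comprehension (set_size == 1 makes singletons only): simpler.

-- ===== PORT A =====
-- module constant: set_size = 1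
def pySetSize : Nat := 1

-- itertools.combinations_with_replacement(xs, r) as lists, in CPython's order (exact by structure)
def pyCWR (xs : List Int) (r : Nat) : List (List Int) :=
  match r, xs with
  | 0, _ => [[]]
  | _ + 1, [] => []
  | r + 1, x :: rest => (pyCWR (x :: rest) r).map (x :: ·) ++ pyCWR rest (r + 1)

def get_vfi_subsets (vfi_col : List Int) : List (List Int) :=
  -- subsets = list(combinations_with_replacement(vfi_col, set_size))
  let subsets := pyCWR vfi_col pySetSize
  -- for value in sorted(subsets): if len(set(value)) != len(value): subsets.remove(value)
  -- (list.remove: every iterated value occurs in subsets — sorted is a snapshot permutation —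
  --  so the ValueError branch, where remove? is none, is unreachable; getD only totalises it)
  (PySem.List.sorted subsets (fun v => v) false).foldl
    (fun subs value =>
      if (PySem.Set.ofList value).length ≠ value.length then
        (PySem.List.remove? subs value).getD subs
      else subs)
    subsets

-- ===== PORT B =====
def get_vfi_subsets_alt (vfi_col : List Int) : List (List Int) :=
  vfi_col.map (fun v => [v])

-- ===== PRECONDITION & SPEC =====
def Spec_get_vfi_subsets (vfi_col : List Int) (out : List (List Int)) : Prop := out = get_vfi_subsets_alt vfi_col
instance (vfi_col : List Int) (out : List (List Int)) : Decidable (Spec_get_vfi_subsets vfi_col out) := by unfold Spec_get_vfi_subsets; infer_instance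

-- ===== CLAIM (what is proved, stated in full; the proofs are below) =====
def Claim_equal_get_vfi_subsets : Prop := ∀ (vfi_col : List Int), Dom_get_vfi_subsets vfi_col → Spec_get_vfi_subsets vfi_col (get_vfi_subsets vfi_col)

-- ===== LEMMAS AND PROOFS =====

-- combinations_with_replacement of size 1 lists each element as a singleton
theorem pyCWR_one (xs : List Int) : pyCWR xs 1 = xs.map (fun v => [v]) := by
  induction xs with
  | nil => simp [pyCWR]
  | cons x rest ih => simp [pyCWR, ih]

-- the removal loop never fires when every iterated value is a singleton
theorem foldl_remove_id (l : List (List Int)) (subs : List (List Int))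
    (h : ∀ v ∈ l, (PySem.Set.ofList v).length = v.length) :
    l.foldl
      (fun subs value =>
        if (PySem.Set.ofList value).length ≠ value.length then
          (PySem.List.remove? subs value).getD subs
        else subs)
      subs = subs := by
  induction l generalizing subs with
  | nil => rfl
  | cons v rest ih =>
    have hv := h v (by simp)
    rw [List.foldl_cons, if_neg (by simp [hv])]
    exact ih subs (fun w hw => h w (by simp [hw]))

-- ===== VERDICT (by name: the statement is the Claim_ definition above) =====
theorem get_vfi_subsets_spec : Claim_equal_get_vfi_subsets := by
  intro vfi_col _
  unfold Spec_get_vfi_subsets get_vfi_subsets get_vfi_subsets_alt pySetSize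
  rw [pyCWR_one]
  apply foldl_remove_id
  intro v hv
  rw [PySem.List.mem_sorted] at hv
  obtain ⟨x, -, rfl⟩ := List.mem_map.mp hv
  rfl
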